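-- pv_equiv track=rewrite | github.com/alexandraback/datacollection | solutions_5631989306621952_0/Python/SAVFOD/A.py | solve
-- ===== SOURCE A (Python) =====
-- def begin(c, sb):
-- 	s_copy = sb.lstrip(c)
-- 	if len(s_copy) == 0:
-- 		return True
-- 	if ord(c) != ord(s_copy[0]):
-- 		return ord(c) > ord(s_copy[0])
--
-- def solve(s):
-- 	new_word = ""
-- 	for c in s:
-- 		if begin(c, new_word):
-- 			new_word = c + new_word
-- 		else:
-- 			new_word = new_word + c
-- 	return new_word
-- ===== SOURCE B (Python) =====
-- # Run-length-encoded deque (two stacks of runs): the prepend/append decision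
-- # reads at most two run characters, and each update touches one run end, so the
-- # whole pass is O(n) instead of A's O(n^2) string rebuilding.
--
-- def _push_back(front, back, c):
--     # append character c to the right end of the word front(reversed)+back
--     if back:
--         if back[-1][0] == c:
--             back[-1][1] += 1
--         else:
--             back.append([c, 1])
--     else:
--         if front[0][0] == c:
--             front[0][1] += 1
--         else:
--             back.append([c, 1])
--
-- def solve(s):
--     # word = runs of reversed(front) followed by runs of back;
--     # adjacent runs always carry distinct characters; front empty only if word empty
--     front = []
--     back = []
--     for c in s:
--         if not front:
--             front.append([c, 1])
--             continue
--         d = front[-1][0]  # first character of the word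
--         if d == c:
--             # first character != c of the word, if any
--             if len(front) >= 2:
--                 nxt = front[-2][0]
--             elif back:
--                 nxt = back[0][0]
--             else:
--                 nxt = None
--             if nxt is None or c > nxt:
--                 front[-1][1] += 1
--             else:
--                 _push_back(front, back, c)
--         elif c > d:
--             front.append([c, 1])
--         else:
--             _push_back(front, back, c)
--     pieces = [ch * k for ch, k in reversed(front)]
--     pieces.extend(ch * k for ch, k in back)
--     return "".join(pieces)
-- ===== Notes on version B (the rewrite author's own statement) =====
-- stated objective: faster
-- what changed: Replaces A's per-character string rebuild (lstrip scan + full-string concatenation each step) with a run-length-encoded deque kept as two stacks of (char,count) runs, so each decision reads at most two run characters and each prepend/append touches one run end.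
import Mathlib
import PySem

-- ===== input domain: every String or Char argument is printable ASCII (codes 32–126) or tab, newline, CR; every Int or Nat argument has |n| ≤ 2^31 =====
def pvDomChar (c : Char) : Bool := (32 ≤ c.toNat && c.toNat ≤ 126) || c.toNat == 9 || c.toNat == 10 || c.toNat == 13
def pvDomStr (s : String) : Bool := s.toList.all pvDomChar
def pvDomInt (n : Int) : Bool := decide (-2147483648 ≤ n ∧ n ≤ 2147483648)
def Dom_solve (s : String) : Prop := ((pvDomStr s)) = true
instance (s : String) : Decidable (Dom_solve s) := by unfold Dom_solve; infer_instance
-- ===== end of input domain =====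

-- B replaces A's per-character lstrip + full-string concatenation with a run-length-encoded
-- deque (two stacks of (char,count) runs): asymptotically faster (O(n) vs O(n^2)).

-- ===== PORT A =====
-- sb.lstrip(c) with a single-character argument strips exactly the leading copies of c:
-- ported by hand as dropWhile (· == c), exact on all strings.
def beginA (c : Char) (sb : List Char) : Bool :=
  match sb.dropWhile (· == c) with
  | [] => true
  | d :: _ => if c ≠ d then decide (d < c) else false  -- final branch: Python returns None (falsy), unreachable

def solve (s : String) : String :=
  String.ofList (s.toList.foldl (fun nw c => if beginA c nw then c :: nw else nw ++ [c]) [])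

-- ===== PORT B =====
-- State: (front, back); front's head is the word's leftmost run (Python front[-1]),
-- back's head is the word's rightmost run (Python back[-1]); word runs = front ++ back.reverse.
def incLast : List (Char × Nat) → List (Char × Nat)
  | [] => []
  | [(d, k)] => [(d, k + 1)]
  | p :: rest => p :: incLast rest

def pushBack (f b : List (Char × Nat)) (c : Char) : List (Char × Nat) × List (Char × Nat) :=
  match b with
  | (e, m) :: bs => if e = c then (f, (e, m + 1) :: bs) else (f, (c, 1) :: (e, m) :: bs)
  | [] =>
    match f.getLast? with
    | some (d, _) => if d = c then (incLast f, []) else (f, [(c, 1)])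
    | none => (f, [(c, 1)])  -- unreachable: pushBack is only called with nonempty front

def stepB (st : List (Char × Nat) × List (Char × Nat)) (c : Char) :
    List (Char × Nat) × List (Char × Nat) :=
  match st with
  | ([], b) => ([(c, 1)], b)
  | ((d, k) :: fs, b) =>
    if d = c then
      let nxt : Option Char :=
        match fs with
        | (e, _) :: _ => some e
        | [] => match b.getLast? with
                | some (e, _) => some e
                | none => none
      match nxt with
      | none => ((d, k + 1) :: fs, b)
      | some e => if e < c then ((d, k + 1) :: fs, b) else pushBack ((d, k) :: fs) b c
    else if d < c then ((c, 1) :: (d, k) :: fs, b)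
    else pushBack ((d, k) :: fs) b c

def expandR (l : List (Char × Nat)) : List Char :=
  l.flatMap (fun p => List.replicate p.2 p.1)

def solve_alt (s : String) : String :=
  let st := s.toList.foldl stepB ([], [])
  String.ofList (expandR st.1 ++ expandR st.2.reverse)

-- ===== PRECONDITION & SPEC =====
def Spec_solve (s : String) (out : String) : Prop := out = solve_alt s
instance (s : String) (out : String) : Decidable (Spec_solve s out) := by unfold Spec_solve; infer_instance

-- ===== CLAIM (what is proved, stated in full; the proofs are below) =====
def Claim_equal_solve : Prop := ∀ (s : String), Dom_solve s → Spec_solve s (solve s)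

-- ===== LEMMAS AND PROOFS =====

def wordOf (f b : List (Char × Nat)) : List Char := expandR f ++ expandR b.reverse

def RunsInv (f b : List (Char × Nat)) : Prop :=
  (f = [] → b = []) ∧ (∀ p ∈ f ++ b.reverse, 1 ≤ p.2) ∧
    ((f ++ b.reverse).map (·.1)).IsChain (· ≠ ·)

theorem expandR_nil : expandR [] = [] := rfl

theorem expandR_cons (p : Char × Nat) (r : List (Char × Nat)) :
    expandR (p :: r) = List.replicate p.2 p.1 ++ expandR r := by simp [expandR]

theorem expandR_append (l l' : List (Char × Nat)) :
    expandR (l ++ l') = expandR l ++ expandR l' := by simp [expandR]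

theorem dw_rep (c : Char) (k : Nat) (t : List Char) :
    List.dropWhile (· == c) (List.replicate k c ++ t) = List.dropWhile (· == c) t := by
  induction k with
  | zero => rfl
  | succ n ih => simp [List.replicate_succ, ih]

theorem dw_head (c d : Char) (t : List Char) (h : d ≠ c) :
    List.dropWhile (· == c) (d :: t) = d :: t := by
  rw [List.dropWhile_cons_of_neg]; simp [h]

theorem incLast_map (f : List (Char × Nat)) :
    (incLast f).map (·.1) = f.map (·.1) := by
  induction f with
  | nil => rfl
  | cons p rest ih =>
    cases rest with
    | nil => rfl
    | cons q r => simpa [incLast] using ih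

theorem incLast_counts (f : List (Char × Nat)) (hpos : ∀ p ∈ f, 1 ≤ p.2) :
    ∀ p ∈ incLast f, 1 ≤ p.2 := by
  induction f with
  | nil => simp [incLast]
  | cons p rest ih =>
    cases rest with
    | nil =>
      intro q hq
      simp only [incLast, List.mem_singleton] at hq
      subst hq
      simp
    | cons q r =>
      intro x hx
      simp only [incLast] at hx
      rcases List.mem_cons.mp hx with h1 | h2
      · exact h1 ▸ hpos p (by simp)
      · exact ih (fun y hy => hpos y (List.mem_cons_of_mem _ hy)) x h2

theorem expand_incLast (f : List (Char × Nat)) (d0 : Char) (k0 : Nat)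
    (h : f.getLast? = some (d0, k0)) : expandR (incLast f) = expandR f ++ [d0] := by
  induction f with
  | nil => simp at h
  | cons p rest ih =>
    cases rest with
    | nil =>
      simp only [List.getLast?_singleton, Option.some.injEq] at h
      subst h
      simp [incLast, expandR_cons, expandR_nil, List.replicate_succ']
    | cons q r =>
      have h' : (q :: r).getLast? = some (d0, k0) := by
        rwa [List.getLast?_cons_cons] at h
      simp only [incLast, expandR_cons, ih h', List.append_assoc]

-- the word obtained by appending c on the right, via pushBack
theorem pushBack_word (f b : List (Char × Nat)) (c : Char) (hne : f ≠ []) :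
    wordOf (pushBack f b c).1 (pushBack f b c).2 = wordOf f b ++ [c] := by
  cases b with
  | cons p bs =>
    obtain ⟨e, m⟩ := p
    by_cases hec : e = c
    · subst hec
      simp [pushBack, wordOf, expandR_append, expandR_cons, expandR_nil, List.replicate_succ']
    · simp [pushBack, hec, wordOf, expandR_append, expandR_cons, expandR_nil]
  | nil =>
    cases hgl : f.getLast? with
    | none => exact absurd (List.getLast?_eq_none_iff.mp hgl) hne
    | some p =>
      obtain ⟨d0, k0⟩ := p
      by_cases hdc : d0 = c
      · subst hdc
        simp [pushBack, hgl, wordOf, expandR_nil, expand_incLast f d0 k0 hgl]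
      · simp [pushBack, hgl, hdc, wordOf, expandR_cons, expandR_nil]

theorem pushBack_inv (f b : List (Char × Nat)) (c : Char) (h : RunsInv f b) (hne : f ≠ []) :
    RunsInv (pushBack f b c).1 (pushBack f b c).2 := by
  obtain ⟨hfb, hpos, hch⟩ := h
  cases b with
  | cons p bs =>
    obtain ⟨e, m⟩ := p
    by_cases hec : e = c
    · -- increment the last run: chars unchanged
      simp only [pushBack, if_pos hec]
      refine ⟨fun hf => absurd hf hne, ?_, ?_⟩
      · intro q hq
        simp only [List.mem_append, List.mem_reverse, List.mem_cons] at hq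
        rcases hq with h1 | h2 | h3
        · exact hpos q (by simp [h1])
        · subst h2; have := hpos (e, m) (by simp); simp
        · exact hpos q (by simp [h3])
      · have : ((f ++ ((e, m + 1) :: bs).reverse).map (·.1)) =
            ((f ++ ((e, m) :: bs).reverse).map (·.1)) := by simp
        rw [this]; exact hch
    · -- push a fresh run (c,1) at the right end
      simp only [pushBack, if_neg hec]
      refine ⟨fun hf => absurd hf hne, ?_, ?_⟩
      · intro q hq
        simp only [List.mem_append, List.mem_reverse, List.mem_cons] at hq
        rcases hq with h1 | h2 | h3 | h4
        · exact hpos q (by simp [h1])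
        · subst h2; simp
        · subst h3; exact hpos (e, m) (by simp)
        · exact hpos q (by simp [h4])
      · have heq : (f ++ ((c, 1) :: (e, m) :: bs).reverse) =
            (f ++ ((e, m) :: bs).reverse) ++ [(c, 1)] := by simp
        rw [heq, List.map_append, List.isChain_append]
        refine ⟨hch, by simp, ?_⟩
        have h2 : ((f ++ ((e, m) :: bs).reverse).map (·.1)).getLast? = some e := by
          have h3 : f ++ ((e, m) :: bs).reverse = (f ++ bs.reverse) ++ [(e, m)] := by simp
          rw [h3]; simp
        intro x hx y hy
        rw [h2] at hx
        simp only [Option.mem_some_iff, List.head?_cons] at hx hy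
        cases hx; cases hy; exact hec
  | nil =>
    cases hgl : f.getLast? with
    | none => exact absurd (List.getLast?_eq_none_iff.mp hgl) hne
    | some p =>
      obtain ⟨d0, k0⟩ := p
      by_cases hdc : d0 = c
      · subst hdc
        simp only [pushBack, hgl, if_true]
        refine ⟨fun _ => rfl, ?_, ?_⟩
        · simpa using incLast_counts f (by simpa using hpos)
        · simpa [incLast_map] using hch
      · simp only [pushBack, hgl, if_neg hdc]
        refine ⟨fun hf => absurd hf hne, ?_, ?_⟩
        · intro q hq
          simp only [List.reverse_nil, List.append_nil] at hpos
          rcases List.mem_append.mp hq with h1 | h2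
          · exact hpos q h1
          · simp only [List.reverse_cons, List.reverse_nil, List.nil_append,
              List.mem_singleton] at h2
            subst h2; simp
        · simp only [List.reverse_nil, List.append_nil] at hch ⊢
          rw [List.reverse_cons, List.reverse_nil, List.nil_append, List.map_append,
            List.isChain_append]
          refine ⟨hch, by simp, ?_⟩
          have h2 : (f.map (·.1)).getLast? = some d0 := by
            rw [List.getLast?_map, hgl]; rfl
          intro x hx y hy
          rw [h2] at hx
          simp only [Option.mem_some_iff, List.head?_cons] at hx hy
          cases hx; cases hy; exact hdc

theorem step_word (f b : List (Char × Nat)) (c : Char) (h : RunsInv f b) :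
    (if beginA c (wordOf f b) then c :: wordOf f b else wordOf f b ++ [c]) =
      wordOf (stepB (f, b) c).1 (stepB (f, b) c).2 := by
  obtain ⟨hfb, hpos, hch⟩ := h
  cases f with
  | nil =>
    have hb : b = [] := hfb rfl
    subst hb
    simp [wordOf, expandR_nil, expandR_cons, stepB, beginA]
  | cons p fs =>
    obtain ⟨d, k⟩ := p
    have hk : 1 ≤ k := hpos (d, k) (by simp)
    obtain ⟨k0, rfl⟩ : ∃ k0, k = k0 + 1 := ⟨k - 1, by omega⟩
    have hword : wordOf ((d, k0 + 1) :: fs) b =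
        List.replicate (k0 + 1) d ++ (expandR fs ++ expandR b.reverse) := by
      simp [wordOf, expandR_cons]
    by_cases hdc : d = c
    · subst hdc
      have hdw : List.dropWhile (· == d) (wordOf ((d, k0 + 1) :: fs) b) =
          List.dropWhile (· == d) (expandR fs ++ expandR b.reverse) := by
        rw [hword, dw_rep]
      cases fs with
      | nil =>
        cases hbr : b.reverse with
        | nil =>
          have hb : b = [] := by simpa using congrArg List.reverse hbr
          subst hb
          have hbeg : beginA d (wordOf [(d, k0 + 1)] []) = true := by
            unfold beginA
            rw [show List.dropWhile (· == d) (wordOf [(d, k0 + 1)] []) = [] from by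
              simpa [expandR_nil] using hdw]
          rw [hbeg, if_pos rfl]
          simp [stepB, wordOf, expandR_cons, expandR_nil, List.replicate_succ]
        | cons q r =>
          obtain ⟨e, m⟩ := q
          have hm : 1 ≤ m := hpos (e, m) (by rw [hbr]; simp)
          obtain ⟨m0, rfl⟩ : ∃ m0, m = m0 + 1 := ⟨m - 1, by omega⟩
          have hed : e ≠ d := by
            rw [hbr] at hch
            simp only [List.cons_append, List.nil_append, List.map_cons,
              List.isChain_cons_cons] at hch
            exact fun he => hch.1 (he ▸ rfl)
          have hgl : b.getLast? = some (e, m0 + 1) := by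
            rw [List.getLast?_eq_head?_reverse, hbr]; rfl
          have hdwe : List.dropWhile (· == d) (wordOf [(d, k0 + 1)] b) =
              e :: (List.replicate m0 e ++ expandR r) := by
            rw [hdw, hbr]
            simp only [expandR_nil, List.nil_append, expandR_cons, List.replicate_succ,
              List.cons_append]
            rw [dw_head _ _ _ hed]
          have hbeg : beginA d (wordOf [(d, k0 + 1)] b) = decide (e < d) := by
            unfold beginA
            rw [hdwe]
            simp [Ne.symm hed]
          by_cases hlt : e < d
          · rw [hbeg, if_pos (by simpa using hlt)]
            simp [stepB, hgl, hlt, wordOf, expandR_cons, List.replicate_succ]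
          · rw [hbeg, if_neg (by simpa using hlt)]
            rw [show stepB ([(d, k0 + 1)], b) d = pushBack [(d, k0 + 1)] b d from by
              simp [stepB, hgl, hlt]]
            exact (pushBack_word [(d, k0 + 1)] b d (by simp)).symm
      | cons q fs' =>
        obtain ⟨e, m⟩ := q
        have hm : 1 ≤ m := hpos (e, m) (by simp)
        obtain ⟨m0, rfl⟩ : ∃ m0, m = m0 + 1 := ⟨m - 1, by omega⟩
        have hed : e ≠ d := by
          simp only [List.cons_append, List.map_cons, List.isChain_cons_cons] at hch
          exact fun he => hch.1 (he ▸ rfl)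
        have hdwe : List.dropWhile (· == d) (wordOf ((d, k0 + 1) :: (e, m0 + 1) :: fs') b) =
            e :: (List.replicate m0 e ++ (expandR fs' ++ expandR b.reverse)) := by
          rw [hdw]
          simp only [expandR_cons, List.replicate_succ, List.cons_append, List.append_assoc]
          rw [dw_head _ _ _ hed]
        have hbeg : beginA d (wordOf ((d, k0 + 1) :: (e, m0 + 1) :: fs') b) =
            decide (e < d) := by
          unfold beginA
          rw [hdwe]
          simp [Ne.symm hed]
        by_cases hlt : e < d
        · rw [hbeg, if_pos (by simpa using hlt)]
          simp [stepB, hlt, wordOf, expandR_cons, List.replicate_succ]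
        · rw [hbeg, if_neg (by simpa using hlt)]
          rw [show stepB ((d, k0 + 1) :: (e, m0 + 1) :: fs', b) d =
              pushBack ((d, k0 + 1) :: (e, m0 + 1) :: fs') b d from by
            simp [stepB, hlt]]
          exact (pushBack_word _ b d (by simp)).symm
    · have hhead : wordOf ((d, k0 + 1) :: fs) b =
          d :: (List.replicate k0 d ++ (expandR fs ++ expandR b.reverse)) := by
        rw [hword]; simp [List.replicate_succ]
      have hbeg : beginA c (wordOf ((d, k0 + 1) :: fs) b) = decide (d < c) := by
        unfold beginA
        rw [hhead, dw_head _ _ _ hdc]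
        simp [Ne.symm hdc]
      by_cases hlt : d < c
      · rw [hbeg, if_pos (by simpa using hlt)]
        simp [stepB, hdc, hlt, wordOf, expandR_cons, List.replicate_succ]
      · rw [hbeg, if_neg (by simpa using hlt)]
        rw [show stepB ((d, k0 + 1) :: fs, b) c = pushBack ((d, k0 + 1) :: fs) b c from by
          simp [stepB, hdc, hlt]]
        exact (pushBack_word _ b c (by simp)).symm

theorem incFirst_inv (d : Char) (k : Nat) (fs b : List (Char × Nat))
    (h : RunsInv ((d, k) :: fs) b) : RunsInv ((d, k + 1) :: fs) b := by
  obtain ⟨_, hpos, hch⟩ := h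
  refine ⟨by simp, ?_, ?_⟩
  · intro q hq
    simp only [List.cons_append, List.mem_cons] at hq
    rcases hq with rfl | h2
    · simp
    · exact hpos q (by simp only [List.cons_append, List.mem_cons]; exact Or.inr h2)
  · have : (((d, k + 1) :: fs ++ b.reverse).map (·.1)) =
        (((d, k) :: fs ++ b.reverse).map (·.1)) := by simp
    rw [this]; exact hch

theorem step_inv (f b : List (Char × Nat)) (c : Char) (h : RunsInv f b) :
    RunsInv (stepB (f, b) c).1 (stepB (f, b) c).2 := by
  have hInv := h
  obtain ⟨hfb, hpos, hch⟩ := h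
  cases f with
  | nil =>
    have hb : b = [] := hfb rfl
    subst hb
    exact ⟨by simp [stepB], by simp [stepB], by simp [stepB]⟩
  | cons p fs =>
    obtain ⟨d, k⟩ := p
    by_cases hdc : d = c
    · subst hdc
      cases fs with
      | nil =>
        cases hbr : b.reverse with
        | nil =>
          have hb : b = [] := by simpa using congrArg List.reverse hbr
          subst hb
          simp only [stepB, List.getLast?_nil, if_pos rfl]
          exact incFirst_inv d k [] [] hInv
        | cons q r =>
          obtain ⟨e, m⟩ := q
          have hgl : b.getLast? = some (e, m) := by
            rw [List.getLast?_eq_head?_reverse, hbr]; rfl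
          by_cases hlt : e < d
          · rw [show stepB ([(d, k)], b) d = ((d, k + 1) :: [], b) from by
              simp [stepB, hgl, hlt]]
            exact incFirst_inv d k [] b hInv
          · rw [show stepB ([(d, k)], b) d = pushBack [(d, k)] b d from by
              simp [stepB, hgl, hlt]]
            exact pushBack_inv _ _ _ hInv (by simp)
      | cons q fs' =>
        obtain ⟨e, m⟩ := q
        by_cases hlt : e < d
        · rw [show stepB ((d, k) :: (e, m) :: fs', b) d = ((d, k + 1) :: (e, m) :: fs', b)
              from by simp [stepB, hlt]]
          exact incFirst_inv d k ((e, m) :: fs') b hInv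
        · rw [show stepB ((d, k) :: (e, m) :: fs', b) d = pushBack ((d, k) :: (e, m) :: fs') b d
              from by simp [stepB, hlt]]
          exact pushBack_inv _ _ _ hInv (by simp)
    · by_cases hlt : d < c
      · rw [show stepB ((d, k) :: fs, b) c = ((c, 1) :: (d, k) :: fs, b) from by
          simp [stepB, hdc, hlt]]
        refine ⟨by simp, ?_, ?_⟩
        · intro q hq
          simp only [List.cons_append, List.mem_cons] at hq
          rcases hq with rfl | h2
          · simp
          · exact hpos q (by simp only [List.cons_append, List.mem_cons]; exact h2)
        · simp only [List.cons_append, List.map_cons, List.isChain_cons_cons]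
          exact ⟨Ne.symm hdc, by simpa using hch⟩
      · rw [show stepB ((d, k) :: fs, b) c = pushBack ((d, k) :: fs) b c from by
          simp [stepB, hdc, hlt]]
        exact pushBack_inv _ _ _ hInv (by simp)

theorem loop_agree (l : List Char) (f b : List (Char × Nat)) (h : RunsInv f b) :
    l.foldl (fun nw c => if beginA c nw then c :: nw else nw ++ [c]) (wordOf f b) =
      wordOf (l.foldl stepB (f, b)).1 (l.foldl stepB (f, b)).2 := by
  induction l generalizing f b with
  | nil => rfl
  | cons c l ih =>
    simp only [List.foldl_cons]
    rw [step_word f b c h]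
    exact ih _ _ (step_inv f b c h)

-- ===== VERDICT (by name: the statement is the Claim_ definition above) =====
theorem solve_spec : Claim_equal_solve := by
  intro s _
  unfold Spec_solve solve solve_alt
  have h := loop_agree s.toList [] [] ⟨fun _ => rfl, by simp, by simp⟩
  simp only [wordOf, expandR, List.reverse_nil, List.flatMap_nil, List.append_nil] at h ⊢
  rw [h]
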